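-- pv_equiv track=rewrite | github.com/kieft1/letterboxed | letterboxed v2.py | three_word_solutions
-- ===== SOURCE A (Python) =====
-- def three_word_solutions(word_list:list,letters_list:list):
--     letters_set = set(letters_list)
--     results = [
--         [word1 , word2 , word3]
--         for word1 in word_list
--         for word2 in word_list
--         for word3 in word_list
--         #if word1 != word2 and word2 != word3 and word3 != word1
--         if word1[-1] == word2[0]
--         if word2[-1] == word3[0]
--         if not letters_set - (set(word1) | set(word2) | set(word3))
--     ]
--     return results
-- ===== SOURCE B (Python) =====
-- def three_word_solutions(word_list: list, letters_list: list):
--     letters_set = set(letters_list)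
--     by_first = {}
--     for w in word_list:
--         by_first.setdefault(w[0], []).append(w)
--     return [
--         [word1, word2, word3]
--         for word1 in word_list
--         for word2 in by_first.get(word1[-1], [])
--         for word3 in by_first.get(word2[-1], [])
--         if not letters_set - (set(word1) | set(word2) | set(word3))
--     ]
-- ===== Notes on version B (the rewrite author's own statement) =====
-- stated objective: faster
-- what changed: Replaces the triple full scan over word_list with a one-pass dict indexing words by first letter, so word2 and word3 are drawn only from the bucket matching the previous word's last letter (same list order, hence identical output).
import Mathlib
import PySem

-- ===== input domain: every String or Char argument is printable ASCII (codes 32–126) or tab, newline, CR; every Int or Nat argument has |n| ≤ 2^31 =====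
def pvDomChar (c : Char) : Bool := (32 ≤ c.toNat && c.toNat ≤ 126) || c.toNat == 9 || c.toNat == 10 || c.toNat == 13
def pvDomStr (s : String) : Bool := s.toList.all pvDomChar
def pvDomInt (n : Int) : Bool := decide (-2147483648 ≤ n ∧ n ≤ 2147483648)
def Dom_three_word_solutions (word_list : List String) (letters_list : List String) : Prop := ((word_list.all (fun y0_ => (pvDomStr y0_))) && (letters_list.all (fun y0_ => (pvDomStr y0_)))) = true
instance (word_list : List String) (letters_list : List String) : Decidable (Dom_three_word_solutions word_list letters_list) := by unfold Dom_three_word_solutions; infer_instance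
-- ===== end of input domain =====

-- B indexes words by first letter once, so the chain search only visits link-compatible candidates (faster; same output order).


-- ===== PORT A =====
-- set(w) in Python is the set of its 1-character substrings, in order of first occurrence
def pvWordSet (w : String) : PySem.Set String :=
  PySem.Set.ofList (w.toList.map (fun c => String.ofList [c]))

-- the shared innermost test: not letters_set - (set(w1) | set(w2) | set(w3))
def pvCovers (letters_set : PySem.Set String) (w1 w2 w3 : String) : Bool :=
  (PySem.Set.diff letters_set
    (PySem.Set.union (PySem.Set.union (pvWordSet w1) (pvWordSet w2)) (pvWordSet w3))).isEmpty

def three_word_solutions (word_list : List String) (letters_list : List String) : List (List String) :=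
  let letters_set := PySem.Set.ofList letters_list
  word_list.flatMap (fun word1 =>
    word_list.flatMap (fun word2 =>
      word_list.filterMap (fun word3 =>
        if (PySem.Str.pyGet? word1 (-1) == PySem.Str.pyGet? word2 0
            && PySem.Str.pyGet? word2 (-1) == PySem.Str.pyGet? word3 0)
            && pvCovers letters_set word1 word2 word3
        then some [word1, word2, word3] else none)))

-- ===== PORT B =====
-- by_first: dict from first letter (w[0], as Option Char: none only off Pre_) to the words starting with it, in list order
def pvByFirst (word_list : List String) : PySem.Dict (Option Char) (List String) :=
  (word_list.map (fun w => (PySem.Str.pyGet? w 0, w))).foldl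
    (fun d p => d.modify p.1 [] (· ++ [p.2])) PySem.Dict.empty

def three_word_solutions_alt (word_list : List String) (letters_list : List String) : List (List String) :=
  let letters_set := PySem.Set.ofList letters_list
  let by_first := pvByFirst word_list
  word_list.flatMap (fun word1 =>
    (by_first.getD (PySem.Str.pyGet? word1 (-1)) []).flatMap (fun word2 =>
      (by_first.getD (PySem.Str.pyGet? word2 (-1)) []).filterMap (fun word3 =>
        if pvCovers letters_set word1 word2 word3
        then some [word1, word2, word3] else none)))

-- ===== PRECONDITION & SPEC =====
-- Pre_ excludes word lists containing the empty string: there Python A raises IndexError on w[-1] (and B on w[0]).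
def Pre_three_word_solutions (word_list : List String) (letters_list : List String) : Prop :=
  "" ∉ word_list
instance (word_list : List String) (letters_list : List String) : Decidable (Pre_three_word_solutions word_list letters_list) := by unfold Pre_three_word_solutions; infer_instance
def pvWitness_three_word_solutions : List String × List String := (["ab", "ba"], ["a", "b"])

def Spec_three_word_solutions (word_list : List String) (letters_list : List String) (out : List (List String)) : Prop := out = three_word_solutions_alt word_list letters_list
instance (word_list : List String) (letters_list : List String) (out : List (List String)) : Decidable (Spec_three_word_solutions word_list letters_list out) := by unfold Spec_three_word_solutions; infer_instance

-- ===== CLAIM (what is proved, stated in full; the proofs are below) =====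
def Claim_equal_three_word_solutions : Prop := ∀ (word_list : List String) (letters_list : List String), Dom_three_word_solutions word_list letters_list → Pre_three_word_solutions word_list letters_list → Spec_three_word_solutions word_list letters_list (three_word_solutions word_list letters_list)

-- ===== LEMMAS AND PROOFS =====

-- the bucket for c is exactly the words whose first letter is c, in list order
theorem pvByFirst_getD (word_list : List String) (c : Option Char) :
    (pvByFirst word_list).getD c [] =
      word_list.filter (fun w => PySem.Str.pyGet? w 0 == c) := by
  unfold pvByFirst
  rw [PySem.Dict.getD_foldl_modify_append]
  simp [List.filter_map, Function.comp_def, List.map_map]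

-- a flatMap whose body is guarded by a predicate is a flatMap over the filtered list
theorem flatMap_guard {α β : Type} (xs : List α) (p : α → Bool) (f : α → List β) :
    xs.flatMap (fun x => if p x then f x else []) = (xs.filter p).flatMap f := by
  induction xs with
  | nil => simp
  | cons x xs ih => by_cases h : p x <;> simp [h, ih]

-- same shape for filterMap with a conjunction of guards
theorem filterMap_guard {α β : Type} (xs : List α) (p : α → Bool) (f : α → Option β) :
    xs.filterMap (fun x => if p x then f x else none) = (xs.filter p).filterMap f := by
  induction xs with
  | nil => simp
  | cons x xs ih =>
    by_cases h : p x <;> simp only [List.filterMap_cons, List.filter_cons, h,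
      if_pos, if_neg, ite_true, ite_false, Bool.false_eq_true, ih]

-- ===== VERDICT (by name: the statement is the Claim_ definition above) =====
theorem three_word_solutions_spec : Claim_equal_three_word_solutions := by
  intro word_list letters_list _ _
  unfold Spec_three_word_solutions three_word_solutions three_word_solutions_alt
  apply List.flatMap_congr
  intro w1 _
  rw [pvByFirst_getD]
  rw [← flatMap_guard word_list (fun w2 => PySem.Str.pyGet? w2 0 == PySem.Str.pyGet? w1 (-1))]
  apply List.flatMap_congr
  intro w2 _
  rw [pvByFirst_getD]
  rw [← filterMap_guard word_list (fun w3 => PySem.Str.pyGet? w3 0 == PySem.Str.pyGet? w2 (-1))]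
  by_cases h1 : PySem.Str.pyGet? w1 (-1) = PySem.Str.pyGet? w2 0
  · rw [if_pos (beq_iff_eq.mpr h1.symm)]
    apply List.filterMap_congr
    intro w3 _
    by_cases h2 : PySem.Str.pyGet? w2 (-1) = PySem.Str.pyGet? w3 0
    · rw [h1, h2]
      simp only [beq_self_eq_true, Bool.true_and, if_true]
    · rw [beq_eq_false_iff_ne.mpr h2, beq_eq_false_iff_ne.mpr (fun e => h2 e.symm)]
      simp only [Bool.and_false, Bool.false_and, Bool.false_eq_true, if_false]
  · rw [if_neg (fun e => h1 (beq_iff_eq.mp e).symm)]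
    rw [List.filterMap_eq_nil_iff.mpr ?_]
    intro w3 _
    rw [beq_eq_false_iff_ne.mpr h1]
    simp only [Bool.false_and, Bool.false_eq_true, if_false]
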